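-- pv_equiv track=rewrite | github.com/YuYejin/algorithm | boj/implementation/9037.py | teacher
-- ===== SOURCE A (Python) =====
-- def teacher(N, C):
--     tmp_lst = [0 for i in range(N)]
--     for idx in range(N):
--         if C[idx] % 2: # 사탕 개수가 홀수 개
--             C[idx] += 1
--         C[idx] //= 2
--         tmp_lst[(idx+1) % N] = C[idx] # 오른쪽에 줄 값
--
--     for idx in range(N):
--         C[idx] += tmp_lst[idx]
--
--     return C
-- ===== SOURCE B (Python) =====
-- def teacher(N, C):
--     # One pass with a carried accumulator: no temporary array, no second loop.
--     # Each child ends with ceil(own/2) + ceil(left neighbor's original/2);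
--     # carry the previous child's half in `prev`, seeded from the last child.
--     if N <= 0:
--         return C
--     prev = (C[N - 1] + 1) // 2
--     for i in range(N):
--         h = (C[i] + 1) // 2
--         C[i] = h + prev
--         prev = h
--     return C
-- ===== Notes on version B (the rewrite author's own statement) =====
-- stated objective: simpler
-- what changed: Replaces A's two staged passes with a temporary push-right array by a single pass carrying one accumulator (the previous child's half, seeded from the last child), using O(1) extra space and no parity branch.
import Mathlib
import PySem

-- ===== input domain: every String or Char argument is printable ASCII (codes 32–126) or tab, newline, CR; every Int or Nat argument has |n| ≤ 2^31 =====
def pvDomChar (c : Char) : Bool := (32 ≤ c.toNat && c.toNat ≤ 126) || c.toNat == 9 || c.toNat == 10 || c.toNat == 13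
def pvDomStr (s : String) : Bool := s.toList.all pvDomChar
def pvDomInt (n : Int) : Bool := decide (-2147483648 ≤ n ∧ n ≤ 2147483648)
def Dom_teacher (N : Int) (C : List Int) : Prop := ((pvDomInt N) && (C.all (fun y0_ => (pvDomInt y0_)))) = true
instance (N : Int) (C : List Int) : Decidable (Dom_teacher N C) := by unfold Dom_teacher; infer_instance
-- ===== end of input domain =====

-- B replaces A's two staged passes and temporary push-right array by a single pass with one
-- carried accumulator (the previous child's half, seeded from the last child), O(1) extra space.
-- Equivalence is about the RETURN value — both Pythons mutate C in place to the same contents.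

-- ===== PORT A =====
-- one iteration of A's first loop: halve C[idx] (rounding up) and push it right
def teacherStep (N : Int) (st : List Int × List Int) (idx : Int) : List Int × List Int :=
  let c0 := PySem.List.pyGetD st.1 idx 0
  let c1 := if PySem.Int.mod c0 2 ≠ 0 then c0 + 1 else c0   -- if C[idx] % 2: C[idx] += 1
  let c2 := PySem.Int.floordiv c1 2                          -- C[idx] //= 2
  (PySem.List.pySetD st.1 idx c2,
   PySem.List.pySetD st.2 (PySem.Int.mod (idx + 1) N) c2)    -- tmp_lst[(idx+1) % N] = C[idx]

-- one iteration of A's second loop: C[idx] += tmp_lst[idx]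
def teacherAdd (tmp acc : List Int) (idx : Int) : List Int :=
  PySem.List.pySetD acc idx (PySem.List.pyGetD acc idx 0 + PySem.List.pyGetD tmp idx 0)

def teacher (N : Int) (C : List Int) : List Int :=
  let tmp_lst : List Int := (PySem.List.pyRange 0 N 1).map (fun _ => 0)
  let st := (PySem.List.pyRange 0 N 1).foldl (teacherStep N) (C, tmp_lst)
  (PySem.List.pyRange 0 N 1).foldl (teacherAdd st.2) st.1

-- ===== PORT B =====
-- one iteration of B's loop: h = (C[i]+1)//2; C[i] = h + prev; prev = h
def altStep (st : List Int × Int) (i : Int) : List Int × Int :=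
  let h := PySem.Int.floordiv (PySem.List.pyGetD st.1 i 0 + 1) 2
  (PySem.List.pySetD st.1 i (h + st.2), h)

def teacher_alt (N : Int) (C : List Int) : List Int :=
  if N ≤ 0 then C
  else
    let prev0 := PySem.Int.floordiv (PySem.List.pyGetD C (N - 1) 0 + 1) 2
    ((PySem.List.pyRange 0 N 1).foldl altStep (C, prev0)).1

-- ===== PRECONDITION & SPEC =====
-- Pre_ excludes exactly the inputs where A raises IndexError (N > len(C)); B raises there too.
def Pre_teacher (N : Int) (C : List Int) : Prop := N ≤ (C.length : Int)
instance (N : Int) (C : List Int) : Decidable (Pre_teacher N C) := by unfold Pre_teacher; infer_instance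
def pvWitness_teacher : Int × List Int := (3, [1, 2, 3])
def Spec_teacher (N : Int) (C : List Int) (out : List Int) : Prop := out = teacher_alt N C
instance (N : Int) (C : List Int) (out : List Int) : Decidable (Spec_teacher N C out) := by unfold Spec_teacher; infer_instance

-- ===== CLAIM (what is proved, stated in full; the proofs are below) =====
def Claim_equal_teacher : Prop := ∀ (N : Int) (C : List Int), Dom_teacher N C → Pre_teacher N C → Spec_teacher N C (teacher N C)

-- ===== LEMMAS AND PROOFS =====

def hv (C : List Int) (k : Nat) : Int := PySem.Int.floordiv (C.getD k 0 + 1) 2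

def part1 (C : List Int) (m : Nat) : List Int := (List.range m).map (hv C) ++ C.drop m

def tval (C : List Int) (n m i : Nat) : Int :=
  if 1 ≤ i ∧ i ≤ m then hv C (i - 1)
  else if i = 0 ∧ m = n then hv C (n - 1)
  else 0

def tpart (C : List Int) (n m : Nat) : List Int := (List.range n).map (tval C n m)

-- B's final value at index i
def resB (C : List Int) (n i : Nat) : Int :=
  hv C i + (if i = 0 then hv C (n - 1) else hv C (i - 1))

lemma stepval (c : Int) :
    PySem.Int.floordiv (if PySem.Int.mod c 2 ≠ 0 then c + 1 else c) 2 =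
      PySem.Int.floordiv (c + 1) 2 := by
  rw [PySem.Int.mod_eq_emod_of_pos (by norm_num),
      PySem.Int.floordiv_eq_ediv_of_pos (show (0:Int) < 2 by norm_num),
      PySem.Int.floordiv_eq_ediv_of_pos (show (0:Int) < 2 by norm_num)]
  by_cases h : c % 2 = 0
  · rw [if_neg (not_not_intro h)]; omega
  · rw [if_pos h]

lemma prefix_read (f : Nat → Int) (L : List Int) (m : Nat) :
    ((List.range m).map f ++ L.drop m).getD m 0 = L.getD m 0 := by
  simp [List.getD, List.getElem?_append_right, List.getElem?_drop]

lemma prefix_step (f : Nat → Int) (L : List Int) (m : Nat) (h : m < L.length) :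
    ((List.range m).map f ++ L.drop m).set m (f m) =
      (List.range (m + 1)).map f ++ L.drop (m + 1) := by
  rw [List.set_append]
  simp only [List.length_map, List.length_range, lt_irrefl, Nat.sub_self]
  rw [List.drop_eq_getElem_cons h, List.set_cons_zero, List.range_succ, List.map_append]
  simp

lemma tpart_set (C : List Int) (n m : Nat) (hn : 0 < n) (hm : m < n) :
    (tpart C n m).set ((m + 1) % n) (hv C m) = tpart C n (m + 1) := by
  apply List.ext_getElem
  · simp [tpart]
  · intro i h1 h2
    have hi : i < n := by simpa [tpart] using h2
    rw [List.getElem_set]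
    simp only [tpart, List.getElem_map, List.getElem_range]
    by_cases hend : m + 1 = n
    · have hmod : (m + 1) % n = 0 := by rw [hend]; exact Nat.mod_self n
      rw [hmod]; unfold tval
      split_ifs <;> first | rfl | omega | (congr 1; omega)
    · have hmod : (m + 1) % n = m + 1 := Nat.mod_eq_of_lt (by omega)
      rw [hmod]; unfold tval
      split_ifs <;> first | rfl | omega | (congr 1; omega)

lemma part1_read (C : List Int) (m : Nat) : (part1 C m).getD m 0 = C.getD m 0 :=
  prefix_read (hv C) C m

lemma part1_set (C : List Int) (m : Nat) (h : m < C.length) :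
    (part1 C m).set m (hv C m) = part1 C (m + 1) :=
  prefix_step (hv C) C m h

lemma part1_getD_lt (C : List Int) (n m : Nat) (hm : m < n) :
    (part1 C n).getD m 0 = hv C m := by
  unfold part1
  rw [List.getD, List.getElem?_append_left (by simpa using hm)]
  simp [hm]

lemma tpart_getD (C : List Int) (n m' m : Nat) (hm : m < n) :
    (tpart C n m').getD m 0 = tval C n m' m := by
  simp [tpart, List.getD, hm]

lemma loop1 (C : List Int) (n : Nat) (hn : 0 < n) (hlen : n ≤ C.length) (m : Nat) (hm : m ≤ n) :
    (List.range m).foldl (fun st (k : Nat) => teacherStep (n : Int) st (k : Int))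
      (C, (List.range n).map (fun _ => (0:Int))) = (part1 C m, tpart C n m) := by
  induction m with
  | zero =>
      simp only [List.range_zero, List.foldl_nil]
      refine Prod.ext ?_ ?_
      · simp [part1]
      · exact List.map_congr_left fun i hi => by
          unfold tval; split_ifs <;> first | rfl | omega
  | succ m ih =>
      rw [List.range_succ, List.foldl_append, ih (by omega), List.foldl_cons, List.foldl_nil]
      unfold teacherStep
      have hcast : (m : Int) + 1 = ((m + 1 : Nat) : Int) := by push_cast; ring
      simp only [hcast, PySem.List.pyGetD_natCast, PySem.List.pySetD_natCast,
        PySem.Int.mod_natCast]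
      rw [part1_read, stepval,
        show PySem.Int.floordiv (C.getD m 0 + 1) 2 = hv C m from rfl,
        part1_set C m (by omega), tpart_set C n m hn (by omega)]

lemma loop2 (C : List Int) (n : Nat) (_hn : 0 < n) (_hlen : n ≤ C.length) (m : Nat) (hm : m ≤ n) :
    (List.range m).foldl (fun acc (k : Nat) => teacherAdd (tpart C n n) acc (k : Int)) (part1 C n) =
      (List.range m).map (fun i => hv C i + tval C n n i) ++ (part1 C n).drop m := by
  induction m with
  | zero => simp
  | succ m ih =>
      rw [List.range_succ, List.foldl_append, ih (by omega), List.foldl_cons, List.foldl_nil]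
      unfold teacherAdd
      simp only [PySem.List.pyGetD_natCast, PySem.List.pySetD_natCast]
      rw [prefix_read, part1_getD_lt C n m (by omega), tpart_getD C n n m (by omega)]
      rw [← List.range_succ]
      exact prefix_step (fun i => hv C i + tval C n n i) (part1 C n) m
        (by simp only [part1, List.length_append, List.length_map, List.length_range,
              List.length_drop]; omega)

-- B's single pass: after m steps the first m cells hold resB and prev carries hv C (m-1)
lemma loopB (C : List Int) (n : Nat) (hn : 0 < n) (hlen : n ≤ C.length) (m : Nat) (hm : m ≤ n) :
    (List.range m).foldl (fun st (k : Nat) => altStep st (k : Int)) (C, hv C (n - 1)) =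
      ((List.range m).map (resB C n) ++ C.drop m,
       if m = 0 then hv C (n - 1) else hv C (m - 1)) := by
  induction m with
  | zero => simp
  | succ m ih =>
      rw [List.range_succ, List.foldl_append, ih (by omega), List.foldl_cons, List.foldl_nil]
      unfold altStep
      simp only [PySem.List.pyGetD_natCast, PySem.List.pySetD_natCast]
      rw [prefix_read]
      refine Prod.ext ?_ ?_
      · show ((List.range m).map (resB C n) ++ C.drop m).set m
            (hv C m + if m = 0 then hv C (n - 1) else hv C (m - 1)) = _
        have : hv C m + (if m = 0 then hv C (n - 1) else hv C (m - 1)) = resB C n m := rfl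
        rw [this, prefix_step (resB C n) C m (by omega), List.range_succ]
      · show hv C m = if m + 1 = 0 then hv C (n - 1) else hv C (m + 1 - 1)
        simp

lemma pyRangeN (n : Nat) :
    PySem.List.pyRange 0 (n : Int) 1 = (List.range n).map (Nat.cast : Nat → Int) := by
  rw [PySem.List.pyRange_one]
  simp only [Int.sub_zero, Int.toNat_natCast, zero_add]

lemma main_eq (N : Int) (C : List Int) (hPre : N ≤ (C.length : Int)) :
    teacher N C = teacher_alt N C := by
  by_cases hN : N ≤ 0
  · simp [teacher, teacher_alt, PySem.List.pyRange_one_eq_nil hN, hN]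
  · obtain ⟨n, rfl⟩ : ∃ n : Nat, N = (n : Int) :=
      ⟨N.toNat, (Int.toNat_of_nonneg (by omega)).symm⟩
    have hn : 0 < n := by omega
    have hlen : n ≤ C.length := by exact_mod_cast hPre
    unfold teacher teacher_alt
    rw [if_neg hN]
    have hprev : PySem.Int.floordiv (PySem.List.pyGetD C ((n : Int) - 1) 0 + 1) 2 = hv C (n - 1) := by
      rw [show (n : Int) - 1 = ((n - 1 : Nat) : Int) by omega, PySem.List.pyGetD_natCast]
      rfl
    rw [pyRangeN]
    simp only [List.foldl_map, List.map_map, Function.comp_def]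
    rw [loop1 C n hn hlen n le_rfl]
    simp only
    rw [loop2 C n hn hlen n le_rfl, hprev, loopB C n hn hlen n le_rfl]
    have hdrop : (part1 C n).drop n = C.drop n := by
      unfold part1
      rw [List.drop_left' (by simp)]
    simp only [hdrop]
    congr 1
    apply List.map_congr_left
    intro i hi
    have hi' : i < n := List.mem_range.mp hi
    unfold tval resB
    split_ifs <;> first | rfl | omega

theorem teacher_spec : Claim_equal_teacher := by
  intro N C _hDom hPre
  unfold Spec_teacher
  exact main_eq N C hPre
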